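-- pv_equiv track=rewrite | github.com/pyrosnowman24/RSU_RL_System | Agent.py | find_playground_text
-- ===== SOURCE A (Python) =====
-- def find_playground_text(lines):
--     start_string = "*.playgroundSizeX ="
--     end_string = "*.playgroundSizeZ ="
--     start_index = 0
--     end_index = 0
--
--     for i, line in enumerate(lines):
--
--         if start_string in line:
--             start_index = i + 1
--         if end_string in line:
--             end_index = i + 1
--             break
--     return start_index,end_index
-- ===== SOURCE B (Python) =====
-- def find_playground_text(lines):
--     start_string = "*.playgroundSizeX ="
--     end_string = "*.playgroundSizeZ ="
--     end_index = next((i + 1 for i, line in enumerate(lines) if end_string in line), 0)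
--     prefix = lines if end_index == 0 else lines[:end_index]
--     start_index = next((j + 1 for j in range(len(prefix) - 1, -1, -1) if start_string in prefix[j]), 0)
--     return start_index, end_index
-- ===== Notes on version B (the rewrite author's own statement) =====
-- stated objective: alternative
-- what changed: Replaces A's single interleaved scan (tracking the latest start marker while searching for the end marker) by two independent passes: first find the end boundary, then back-scan the prefix up to it for the last start marker, breaking at the first hit.
import Mathlib
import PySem

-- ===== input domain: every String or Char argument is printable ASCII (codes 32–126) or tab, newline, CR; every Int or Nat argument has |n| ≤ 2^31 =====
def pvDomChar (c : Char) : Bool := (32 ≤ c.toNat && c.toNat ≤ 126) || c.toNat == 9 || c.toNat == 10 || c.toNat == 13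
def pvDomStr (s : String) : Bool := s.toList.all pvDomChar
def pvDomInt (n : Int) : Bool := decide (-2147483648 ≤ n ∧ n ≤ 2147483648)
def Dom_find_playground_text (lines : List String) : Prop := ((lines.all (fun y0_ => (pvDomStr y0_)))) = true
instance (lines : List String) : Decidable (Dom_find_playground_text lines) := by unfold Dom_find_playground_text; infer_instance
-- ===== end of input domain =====

-- B replaces A's single interleaved scan by two independent passes (find the end
-- boundary first, then back-scan the prefix for the last start marker): an
-- alternative decomposition of the same cost.

def pvStartS : String := "*.playgroundSizeX ="
def pvEndS : String := "*.playgroundSizeZ ="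

-- ===== PORT A =====
-- A's single loop: enumerate, remember latest start hit, break at first end hit.
def pvGoA : List String → Int → Int → Int × Int
  | [], _, st => (st, 0)
  | l :: rest, i, st =>
    let st' := if PySem.Str.isIn pvStartS l then i + 1 else st
    if PySem.Str.isIn pvEndS l then (st', i + 1) else pvGoA rest (i + 1) st'

def find_playground_text (lines : List String) : Int × Int :=
  pvGoA lines 0 0

-- ===== PORT B =====
-- first loop of Source B: break at the first end-marker hit, end_index = i+1, else 0
def pvEndFind : List String → Int → Int
  | [], _ => 0
  | l :: rest, i => if PySem.Str.isIn pvEndS l then i + 1 else pvEndFind rest (i + 1)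

-- second loop of Source B: j = n-1 … 0, break at the first (= last-positioned) start hit
-- (prefix[j] is always in range in Source B; getD is exact here)
def pvBackScan (pref : List String) : Nat → Int
  | 0 => 0
  | j + 1 => if PySem.Str.isIn pvStartS (pref.getD j "") then (j : Int) + 1 else pvBackScan pref j

def find_playground_text_alt (lines : List String) : Int × Int :=
  let e := pvEndFind lines 0
  -- lines[:e] with 0 ≤ e : exactly List.take
  let pref := if e = 0 then lines else lines.take e.toNat
  (pvBackScan pref pref.length, e)

-- ===== PRECONDITION & SPEC =====
def Spec_find_playground_text (lines : List String) (out : Int × Int) : Prop := out = find_playground_text_alt lines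
instance (lines : List String) (out : Int × Int) : Decidable (Spec_find_playground_text lines out) := by unfold Spec_find_playground_text; infer_instance

-- ===== CLAIM (what is proved, stated in full; the proofs are below) =====
def Claim_equal_find_playground_text : Prop := ∀ (lines : List String), Dom_find_playground_text lines → Spec_find_playground_text lines (find_playground_text lines)

-- ===== LEMMAS AND PROOFS =====

def pvPref (l : List String) : List String :=
  if pvEndFind l 0 = 0 then l else l.take (pvEndFind l 0).toNat

theorem pvEndFind_nonneg (l : List String) (i : Int) (hi : 0 ≤ i) : 0 ≤ pvEndFind l i := by
  induction l generalizing i with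
  | nil => simp [pvEndFind]
  | cons h t ih =>
    simp only [pvEndFind]
    split
    · omega
    · exact ih (i + 1) (by omega)

theorem pvEndFind_shift (l : List String) (a : Int) :
    pvEndFind l a = pvEndFind l 0 + (if pvEndFind l 0 = 0 then 0 else a) := by
  induction l generalizing a with
  | nil => simp [pvEndFind]
  | cons h t ih =>
    have h0 : 0 ≤ pvEndFind t 0 := pvEndFind_nonneg t 0 le_rfl
    by_cases ce : PySem.Chars.isIn pvEndS.toList h.toList = true
    · simp [pvEndFind, ce]; omega
    · simp only [pvEndFind, PySem.Str.isIn_eq, ce, if_false, zero_add,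
        Bool.false_eq_true]
      rw [ih (a + 1), ih 1]
      by_cases he : pvEndFind t 0 = 0 <;> simp [he] <;> omega

theorem pvBackScan_nonneg (p : List String) (j : Nat) : 0 ≤ pvBackScan p j := by
  induction j with
  | zero => simp [pvBackScan]
  | succ j ih =>
    simp only [pvBackScan]
    split
    · positivity
    · exact ih

theorem pvBackScan_succ (p : List String) (j : Nat) :
    pvBackScan p (j + 1) =
      if PySem.Str.isIn pvStartS (p.getD j "") then (j : Int) + 1 else pvBackScan p j := by
  rw [pvBackScan]

theorem pvBackScan_cons (h : String) (p : List String) (j : Nat) :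
    pvBackScan (h :: p) (j + 1) =
      if pvBackScan p j = 0 then (if PySem.Str.isIn pvStartS h then 1 else 0)
      else pvBackScan p j + 1 := by
  induction j with
  | zero => simp [pvBackScan]
  | succ j ih =>
    rw [pvBackScan_succ (h :: p) (j + 1), List.getD_cons_succ, pvBackScan_succ p j]
    by_cases hc : PySem.Str.isIn pvStartS (p.getD j "") = true
    · rw [if_pos hc, if_pos hc, if_neg (show ¬((j : Int) + 1 = 0) by positivity)]
      push_cast; ring
    · rw [if_neg hc, if_neg hc, ih]

theorem pvGoA_eq (l : List String) (i st : Int) :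
    pvGoA l i st =
      ((if pvBackScan (pvPref l) (pvPref l).length = 0 then st
        else i + pvBackScan (pvPref l) (pvPref l).length),
       (if pvEndFind l 0 = 0 then 0 else i + pvEndFind l 0)) := by
  induction l generalizing i st with
  | nil => simp [pvGoA, pvPref, pvEndFind, pvBackScan]
  | cons h t ih =>
    by_cases ce : PySem.Chars.isIn pvEndS.toList h.toList = true
    · -- break at this line: end = i+1, prefix = [h]
      have hE : pvEndFind (h :: t) 0 = 1 := by simp [pvEndFind, ce]
      have hP : pvPref (h :: t) = [h] := by simp [pvPref, hE]
      by_cases cs : PySem.Chars.isIn pvStartS.toList h.toList = true <;>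
        simp [pvGoA, ce, cs, hE, hP, pvBackScan]
    · -- keep scanning
      have hE : pvEndFind (h :: t) 0 =
          pvEndFind t 0 + (if pvEndFind t 0 = 0 then 0 else 1) := by
        simp only [pvEndFind, PySem.Str.isIn_eq, ce, Bool.false_eq_true, if_false,
          if_neg, zero_add]
        exact pvEndFind_shift t 1
      have h0 : 0 ≤ pvEndFind t 0 := pvEndFind_nonneg t 0 le_rfl
      have hP : pvPref (h :: t) = h :: pvPref t := by
        by_cases he : pvEndFind t 0 = 0
        · simp [pvPref, hE, he]
        · have h1 : pvEndFind t 0 + 1 ≠ 0 := by omega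
          have h2 : (pvEndFind t 0 + 1).toNat = (pvEndFind t 0).toNat + 1 := by omega
          simp [pvPref, hE, he, h1, h2]
      have hBS := pvBackScan_cons h (pvPref t) (pvPref t).length
      have hBnn := pvBackScan_nonneg (pvPref t) (pvPref t).length
      simp only [pvGoA, PySem.Str.isIn_eq, ce, Bool.false_eq_true, if_neg, if_false]
      rw [ih (i + 1) _, hP]
      simp only [List.length_cons, hBS, hE, Prod.mk.injEq, PySem.Str.isIn_eq]
      constructor <;> split_ifs <;> omega

-- ===== VERDICT (by name: the statement is the Claim_ definition above) =====
theorem find_playground_text_spec : Claim_equal_find_playground_text := by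
  intro lines _
  show _ = _
  rw [find_playground_text, pvGoA_eq]
  have hBnn := pvBackScan_nonneg (pvPref lines) (pvPref lines).length
  simp only [find_playground_text_alt]
  rw [show (if pvEndFind lines 0 = 0 then lines
      else lines.take (pvEndFind lines 0).toNat) = pvPref lines from rfl]
  rw [Prod.mk.injEq]
  constructor <;> split_ifs <;> omega
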